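-- pv_equiv track=rewrite | github.com/gonzalogacc/aoc-2024 | day-05/solution.py | order_by_page
-- ===== SOURCE A (Python) =====
-- def order_by_page(order_pairs: list[tuple[int, int]], update: list[int]) -> dict[int, dict]:
--     page2order = {}
--     for first, second in order_pairs:
--         if first not in update or second not in update:
--             continue
--
--         if first not in page2order:
--             page2order[first] = dict(pages_before=[], pages_after=[])
--         page2order[first]['pages_after'].append(second)
--
--         if second not in page2order:
--             page2order[second] = dict(pages_before=[], pages_after=[])
--         page2order[second]['pages_before'].append(first)
--
--     return page2order
-- ===== SOURCE B (Python) =====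
-- def order_by_page(order_pairs: list[tuple[int, int]], update: list[int]) -> dict[int, dict]:
--     update_set = set(update)
--     retained = [(a, b) for a, b in order_pairs if a in update_set and b in update_set]
--     keys = []
--     for a, b in retained:
--         if a not in keys:
--             keys.append(a)
--         if b not in keys:
--             keys.append(b)
--     return {k: dict(pages_before=[a for a, b in retained if b == k],
--                     pages_after=[b for a, b in retained if a == k])
--             for k in keys}
-- ===== Notes on version B (the rewrite author's own statement) =====
-- stated objective: faster
-- what changed: B replaces A's single interleaved pass that mutates nested per-page dicts (with O(|update|) list-membership tests per pair) by a staged pipeline: filter the retained pairs once using a set of update, collect the ordered key list, then rebuild each page's before/after lists by per-key comprehensions over the retained pairs.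
import Mathlib
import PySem

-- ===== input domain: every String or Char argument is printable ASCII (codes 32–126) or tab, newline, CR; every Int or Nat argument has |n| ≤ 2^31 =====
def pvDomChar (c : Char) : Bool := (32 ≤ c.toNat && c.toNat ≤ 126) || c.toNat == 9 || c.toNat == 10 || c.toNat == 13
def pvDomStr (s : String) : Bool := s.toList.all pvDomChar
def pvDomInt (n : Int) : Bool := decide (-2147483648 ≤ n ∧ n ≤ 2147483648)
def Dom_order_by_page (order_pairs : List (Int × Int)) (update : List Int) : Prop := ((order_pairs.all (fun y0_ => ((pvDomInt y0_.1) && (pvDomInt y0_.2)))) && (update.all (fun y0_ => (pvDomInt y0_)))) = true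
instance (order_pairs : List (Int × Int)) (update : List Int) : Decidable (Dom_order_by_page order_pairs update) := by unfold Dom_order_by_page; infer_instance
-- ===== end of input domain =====

-- B stages the work: filter the retained pairs, collect the ordered keys, then rebuild each
-- page's before/after lists by per-key scans of the retained pairs, instead of A's single
-- interleaved pass mutating nested dicts with list-membership tests (objective: faster, measured; the return value is proved identical).

-- ===== PORT A =====
-- the fresh inner dict A creates: dict(pages_before=[], pages_after=[])
def obpA_d0 : PySem.Dict String (List Int) :=
  PySem.Dict.ofList [("pages_before", []), ("pages_after", [])]

def obpA_step (update : List Int) (d : PySem.Dict Int (PySem.Dict String (List Int)))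
    (p : Int × Int) : PySem.Dict Int (PySem.Dict String (List Int)) :=
  if !(update.contains p.1) || !(update.contains p.2) then d
  else
    let d1 := if d.contains p.1 then d else d.insert p.1 obpA_d0
    let d2 := d1.modify p.1 PySem.Dict.empty (fun inner => inner.modify "pages_after" [] (· ++ [p.2]))
    let d3 := if d2.contains p.2 then d2 else d2.insert p.2 obpA_d0
    d3.modify p.2 PySem.Dict.empty (fun inner => inner.modify "pages_before" [] (· ++ [p.1]))

def order_by_page (order_pairs : List (Int × Int)) (update : List Int) :
    List (Int × List (String × List Int)) :=
  ((order_pairs.foldl (obpA_step update) PySem.Dict.empty).items).map (fun p => (p.1, p.2.items))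

-- ===== PORT B =====
-- one step of B's key-collection loop: 'if a not in keys: keys.append(a)' then the same for b
def obpB_keyStep (ks : List Int) (p : Int × Int) : List Int :=
  let ks1 := if ks.contains p.1 then ks else ks ++ [p.1]
  if ks1.contains p.2 then ks1 else ks1 ++ [p.2]

def order_by_page_alt (order_pairs : List (Int × Int)) (update : List Int) :
    List (Int × List (String × List Int)) :=
  let uset := PySem.Set.ofList update
  let retained := order_pairs.filter (fun p => uset.contains p.1 && uset.contains p.2)
  let keys := retained.foldl obpB_keyStep []
  keys.map (fun k =>
    (k, [("pages_before", (retained.filter (fun p => p.2 == k)).map Prod.fst),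
         ("pages_after", (retained.filter (fun p => p.1 == k)).map Prod.snd)]))

-- ===== PRECONDITION & SPEC =====
def Spec_order_by_page (order_pairs : List (Int × Int)) (update : List Int) (out : List (Int × List (String × List Int))) : Prop := out = order_by_page_alt order_pairs update
instance (order_pairs : List (Int × Int)) (update : List Int) (out : List (Int × List (String × List Int))) : Decidable (Spec_order_by_page order_pairs update out) := by unfold Spec_order_by_page; infer_instance

-- ===== CLAIM (what is proved, stated in full; the proofs are below) =====
def Claim_equal_order_by_page : Prop := ∀ (order_pairs : List (Int × Int)) (update : List Int), Dom_order_by_page order_pairs update → Spec_order_by_page order_pairs update (order_by_page order_pairs update)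

-- ===== LEMMAS AND PROOFS =====

-- the inner dict B's second phase rebuilds for key k from the retained pairs r
def obpG (r : List (Int × Int)) (k : Int) : PySem.Dict String (List Int) :=
  PySem.Dict.mk [("pages_before", (r.filter (fun p => p.2 == k)).map Prod.fst),
                 ("pages_after", (r.filter (fun p => p.1 == k)).map Prod.snd)]

-- A's "create if absent, then modify" combination
def obpUpd (d : PySem.Dict Int (PySem.Dict String (List Int))) (k : Int)
    (g : PySem.Dict String (List Int) → PySem.Dict String (List Int)) :
    PySem.Dict Int (PySem.Dict String (List Int)) :=
  (if d.contains k then d else d.insert k obpA_d0).modify k PySem.Dict.empty g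

lemma obpUpd_keys (d : PySem.Dict Int (PySem.Dict String (List Int))) (k : Int) (g) :
    (obpUpd d k g).keys = PySem.Set.add d.keys k := by
  unfold obpUpd
  by_cases h : d.contains k
  · rw [if_pos h, PySem.Dict.keys_modify, PySem.Dict.keys_insert_of_contains _ _ h,
      PySem.Set.add_of_mem ((PySem.Dict.contains_iff_mem_keys d k).1 h)]
  · have h' : d.contains k = false := by simpa using h
    rw [if_neg h, PySem.Dict.keys_modify,
      PySem.Dict.keys_insert_of_contains _ _ (PySem.Dict.contains_insert_self ..),
      PySem.Dict.keys_insert_of_not_contains _ _ h',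
      PySem.Set.add_of_not_mem (fun hm => by simp [(PySem.Dict.contains_iff_mem_keys d k).2 hm] at h')]

lemma obpUpd_getD (d : PySem.Dict Int (PySem.Dict String (List Int))) (k : Int) (g) (k' : Int) :
    (obpUpd d k g).getD k' PySem.Dict.empty
      = if k' = k then g (if k ∈ d.keys then d.getD k PySem.Dict.empty else obpA_d0)
        else d.getD k' PySem.Dict.empty := by
  unfold obpUpd
  by_cases h : d.contains k
  · rw [if_pos h, PySem.Dict.getD_modify, if_pos ((PySem.Dict.contains_iff_mem_keys d k).1 h)]
  · rw [if_neg h, PySem.Dict.getD_modify,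
      if_neg (fun hm => h ((PySem.Dict.contains_iff_mem_keys d k).2 hm))]
    by_cases hk : k' = k
    · rw [if_pos hk, if_pos hk, PySem.Dict.getD_insert_self]
    · rw [if_neg hk, if_neg hk, PySem.Dict.getD_insert_of_ne _ _ _ hk]

-- A's step on a retained pair is the two obpUpd applications
lemma obpA_step_pos (update : List Int) (d) (p : Int × Int)
    (h1 : p.1 ∈ update) (h2 : p.2 ∈ update) :
    obpA_step update d p =
      obpUpd (obpUpd d p.1 (fun inner => inner.modify "pages_after" [] (· ++ [p.2])))
        p.2 (fun inner => inner.modify "pages_before" [] (· ++ [p.1])) := by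
  unfold obpA_step obpUpd
  simp [h1, h2]

-- A's step skips a pair with an endpoint outside update
lemma obpA_step_neg (update : List Int) (d) (p : Int × Int)
    (h : p.1 ∉ update ∨ p.2 ∉ update) : obpA_step update d p = d := by
  unfold obpA_step
  rcases h with h | h <;> rw [if_pos (by simp [h])]

-- B's key step is two Set.add applications
lemma obpB_keyStep_eq (ks : List Int) (p : Int × Int) :
    obpB_keyStep ks p = PySem.Set.add (PySem.Set.add ks p.1) p.2 := by
  simp [obpB_keyStep, PySem.Set.add_eq_ite]

-- membership in B's key fold
lemma obpB_mem_keyFold (r : List (Int × Int)) (ks : List Int) (x : Int) :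
    x ∈ r.foldl obpB_keyStep ks ↔ x ∈ ks ∨ ∃ q ∈ r, x = q.1 ∨ x = q.2 := by
  induction r generalizing ks with
  | nil => simp
  | cons p t ih =>
    rw [List.foldl_cons, ih, obpB_keyStep_eq]
    simp only [PySem.Set.mem_add, List.mem_cons]
    constructor
    · rintro (((h | h) | h) | ⟨q, hq, hx⟩)
      · exact Or.inl h
      · exact Or.inr ⟨p, Or.inl rfl, Or.inl h⟩
      · exact Or.inr ⟨p, Or.inl rfl, Or.inr h⟩
      · exact Or.inr ⟨q, Or.inr hq, hx⟩
    · rintro (h | ⟨q, (rfl | hq), hx⟩)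
      · exact Or.inl (Or.inl (Or.inl h))
      · rcases hx with h | h
        · exact Or.inl (Or.inl (Or.inr h))
        · exact Or.inl (Or.inr h)
      · exact Or.inr ⟨q, hq, hx⟩

lemma obpB_nodup_keyFold (r : List (Int × Int)) (ks : List Int) (h : ks.Nodup) :
    (r.foldl obpB_keyStep ks).Nodup := by
  induction r generalizing ks with
  | nil => exact h
  | cons p t ih =>
    rw [List.foldl_cons, obpB_keyStep_eq]
    exact ih _ (PySem.Set.nodup_add _ _ (PySem.Set.nodup_add _ _ h))

-- a key outside the key fold touches no retained pair, so its rebuilt entry is the fresh dict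
lemma obpG_of_not_mem (r : List (Int × Int)) (k : Int)
    (h : k ∉ r.foldl obpB_keyStep []) : obpG r k = obpA_d0 := by
  have hq : ∀ q ∈ r, k ≠ q.1 ∧ k ≠ q.2 := by
    intro q hqr
    constructor <;> intro he <;>
      exact h ((obpB_mem_keyFold r [] k).2 (Or.inr ⟨q, hqr, by simp [he]⟩))
  unfold obpG
  rw [List.filter_eq_nil_iff.2 (fun q hqr => by
        simp only [beq_iff_eq]; exact fun he => (hq q hqr).2 he.symm),
    List.filter_eq_nil_iff.2 (fun q hqr => by
        simp only [beq_iff_eq]; exact fun he => (hq q hqr).1 he.symm)]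
  rfl

-- appending one retained pair to B's rebuilt entry
lemma obpG_append (r : List (Int × Int)) (p : Int × Int) (k : Int) :
    obpG (r ++ [p]) k
      = PySem.Dict.mk
          [("pages_before", (r.filter (fun q => q.2 == k)).map Prod.fst ++ (if p.2 = k then [p.1] else [])),
           ("pages_after", (r.filter (fun q => q.1 == k)).map Prod.snd ++ (if p.1 = k then [p.2] else []))] := by
  unfold obpG
  by_cases h2 : p.2 = k <;> by_cases h1 : p.1 = k <;>
    simp [List.filter_append, h1, h2]

-- the inner-dict updates on a literal two-entry dict
lemma obpMk_after (x y : List Int) (b : Int) :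
    (PySem.Dict.mk [("pages_before", x), ("pages_after", y)]).modify "pages_after" [] (· ++ [b])
      = PySem.Dict.mk [("pages_before", x), ("pages_after", y ++ [b])] := rfl

lemma obpMk_before (x y : List Int) (a : Int) :
    (PySem.Dict.mk [("pages_before", x), ("pages_after", y)]).modify "pages_before" [] (· ++ [a])
      = PySem.Dict.mk [("pages_before", x ++ [a]), ("pages_after", y)] := rfl

-- invariant: A's dict so far is described by B's two phases applied to the retained pairs so far
def obpInv (d : PySem.Dict Int (PySem.Dict String (List Int))) (r : List (Int × Int)) : Prop :=
  d.keys = r.foldl obpB_keyStep [] ∧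
  ∀ k ∈ r.foldl obpB_keyStep [], d.getD k PySem.Dict.empty = obpG r k

lemma obpInv_step (update : List Int) (d) (r : List (Int × Int)) (p : Int × Int)
    (h : obpInv d r) (h1 : p.1 ∈ update) (h2 : p.2 ∈ update) :
    obpInv (obpA_step update d p) (r ++ [p]) := by
  obtain ⟨hkeys, hin⟩ := h
  set K := r.foldl obpB_keyStep [] with hK
  have hKnew : (r ++ [p]).foldl obpB_keyStep []
      = PySem.Set.add (PySem.Set.add K p.1) p.2 := by
    rw [List.foldl_append, List.foldl_cons, List.foldl_nil, obpB_keyStep_eq]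
  rw [obpA_step_pos update d p h1 h2]
  have hK1 : (obpUpd d p.1 (fun inner => inner.modify "pages_after" [] (· ++ [p.2]))).keys
      = PySem.Set.add K p.1 := by rw [obpUpd_keys, hkeys]
  refine ⟨by rw [hKnew, obpUpd_keys, hK1], ?_⟩
  intro k hk
  rw [hKnew] at hk
  have hbase : ∀ j : Int, (if j ∈ d.keys then d.getD j PySem.Dict.empty else obpA_d0)
      = obpG r j := by
    intro j
    by_cases hj : j ∈ K
    · rw [hkeys, if_pos hj, hin j hj]
    · rw [hkeys, if_neg hj, obpG_of_not_mem r j (hK ▸ hj)]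
  rw [obpG_append, obpUpd_getD]
  by_cases hkb : k = p.2
  · rw [if_pos hkb, hK1]
    subst hkb
    by_cases hba : p.2 = p.1
    · have hm : p.2 ∈ PySem.Set.add K p.1 := (PySem.Set.mem_add ..).2 (Or.inr hba)
      rw [if_pos hm, obpUpd_getD, if_pos hba, hbase p.1, if_pos rfl, if_pos hba.symm]
      unfold obpG
      rw [obpMk_after, obpMk_before, hba]
    · have hmid : (if p.2 ∈ PySem.Set.add K p.1
            then (obpUpd d p.1 (fun inner => inner.modify "pages_after" [] (· ++ [p.2]))).getD
                   p.2 PySem.Dict.empty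
            else obpA_d0) = obpG r p.2 := by
        by_cases hm : p.2 ∈ PySem.Set.add K p.1
        · have hmem : p.2 ∈ K := by
            rcases (PySem.Set.mem_add ..).1 hm with h' | h'
            · exact h'
            · exact absurd h' hba
          rw [if_pos hm, obpUpd_getD, if_neg hba, hin p.2 hmem]
        · have : p.2 ∉ K := fun h' => hm ((PySem.Set.mem_add ..).2 (Or.inl h'))
          rw [if_neg hm, obpG_of_not_mem r p.2 (hK ▸ this)]
      rw [hmid, if_pos rfl, if_neg (fun he : p.1 = p.2 => hba he.symm)]
      unfold obpG
      rw [obpMk_before]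
      simp
  · rw [if_neg hkb, obpUpd_getD, if_neg (fun he : p.2 = k => hkb he.symm)]
    by_cases hka : k = p.1
    · subst hka
      rw [if_pos rfl, hbase p.1, if_pos rfl]
      unfold obpG
      rw [obpMk_after]
      simp
    · rw [if_neg hka, if_neg (fun he : p.1 = k => hka he.symm)]
      have hkK : k ∈ K := by
        rcases (PySem.Set.mem_add ..).1 hk with h' | h'
        · rcases (PySem.Set.mem_add ..).1 h' with h'' | h''
          · exact h''
          · exact absurd h'' hka
        · exact absurd h' hkb
      rw [hin k hkK]
      unfold obpG
      simp

lemma obpInv_foldl (update : List Int) (l r : List (Int × Int)) (d)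
    (h : obpInv d r) :
    obpInv (l.foldl (obpA_step update) d)
      (r ++ l.filter (fun p => (PySem.Set.ofList update).contains p.1
                                && (PySem.Set.ofList update).contains p.2)) := by
  induction l generalizing r d with
  | nil => simpa using h
  | cons p t ih =>
    by_cases hp : p.1 ∈ update ∧ p.2 ∈ update
    · have hb : ((PySem.Set.ofList update).contains p.1
          && (PySem.Set.ofList update).contains p.2) = true := by
        simp only [Bool.and_eq_true, PySem.Set.contains_iff, PySem.Set.mem_ofList]
        exact hp
      rw [List.foldl_cons, List.filter_cons, hb, if_pos rfl, List.append_cons]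
      exact ih _ _ (obpInv_step update d r p h hp.1 hp.2)
    · have hb : ((PySem.Set.ofList update).contains p.1
          && (PySem.Set.ofList update).contains p.2) = false := by
        rw [Bool.and_eq_false_iff]
        rcases not_and_or.1 hp with h' | h' <;> [left; right] <;>
          simpa [PySem.Set.contains_eq_listContains] using h'
      rw [List.foldl_cons, List.filter_cons, hb, if_neg (by simp),
        obpA_step_neg update d p (not_and_or.1 hp)]
      exact ih _ _ h

-- ===== VERDICT (by name: the statement is the Claim_ definition above) =====
theorem order_by_page_spec : Claim_equal_order_by_page := by
  intro order_pairs update _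
  unfold Spec_order_by_page order_by_page order_by_page_alt
  obtain ⟨hkeys, hin⟩ := obpInv_foldl update order_pairs [] PySem.Dict.empty
    ⟨rfl, fun k hk => absurd hk (List.not_mem_nil)⟩
  simp only [List.nil_append] at hkeys hin
  set rs := order_pairs.filter (fun p => (PySem.Set.ofList update).contains p.1
      && (PySem.Set.ofList update).contains p.2) with hrs
  set dA := order_pairs.foldl (obpA_step update) PySem.Dict.empty with hdA
  rw [PySem.Dict.items_eq_map_keys dA (by rw [hkeys]; exact obpB_nodup_keyFold rs [] List.nodup_nil)
      PySem.Dict.empty, hkeys, List.map_map]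
  refine List.map_congr_left (fun k hk => ?_)
  simp only [Function.comp]
  rw [hin k hk]
  rfl
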